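-- pv_equiv track=rewrite | github.com/adamcritchley/scratchllm | training.py | get_rows_src_dataset
-- ===== SOURCE A (Python) =====
-- def get_rows_src_dataset(ds):
--     fsize = 0
--     indices = []
--     for l in ds:
--         if l.startswith("int main("):
--             indices.append(fsize)
--         fsize += len(l)
--     return indices
-- ===== SOURCE B (Python) =====
-- def get_rows_src_dataset(ds):
--     lines = list(ds)
--     offsets = [0]
--     for l in lines:
--         offsets.append(offsets[-1] + len(l))
--     return [off for off, l in zip(offsets, lines) if l.startswith("int main(")]
-- ===== Notes on version B (the rewrite author's own statement) =====
-- stated objective: alternative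
-- what changed: A accumulates the byte offset and appends matches inline in one loop; B first builds a prefix-sum offset table, then filters matching lines in a separate zip pass.
import Mathlib
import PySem

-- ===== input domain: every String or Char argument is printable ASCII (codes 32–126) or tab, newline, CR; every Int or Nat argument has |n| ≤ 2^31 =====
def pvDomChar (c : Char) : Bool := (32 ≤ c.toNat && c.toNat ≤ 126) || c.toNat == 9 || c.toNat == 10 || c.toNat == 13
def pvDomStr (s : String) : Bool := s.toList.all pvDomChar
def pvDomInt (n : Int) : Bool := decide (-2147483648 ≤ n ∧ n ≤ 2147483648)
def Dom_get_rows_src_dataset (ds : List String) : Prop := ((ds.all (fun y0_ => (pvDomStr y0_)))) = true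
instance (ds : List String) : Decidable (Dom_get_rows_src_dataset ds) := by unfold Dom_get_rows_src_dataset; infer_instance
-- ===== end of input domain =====

-- B restructures A: A accumulates the offset and matches inline in one loop; B builds a
-- prefix-offset table first, then filters matching lines in a separate zip pass (same cost).

-- ===== PORT A =====
-- loop body: 'if l.startswith("int main("): indices.append(fsize)' then 'fsize += len(l)'
def pvStepA (st : Int × List Int) (l : String) : Int × List Int :=
  (st.1 + (PySem.Str.len l : Int),
   if PySem.Str.startswith l "int main(" then st.2 ++ [st.1] else st.2)

def get_rows_src_dataset (ds : List String) : List Int :=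
  (ds.foldl pvStepA ((0 : Int), ([] : List Int))).2

-- ===== PORT B =====
-- prefix-sum offset table: offsets = [0]; for l in lines: offsets.append(offsets[-1] + len(l))
def pvOffsets (f : Int) : List String → List Int
  | [] => [f]
  | l :: ls => f :: pvOffsets (f + (PySem.Str.len l : Int)) ls

def get_rows_src_dataset_alt (ds : List String) : List Int :=
  ((pvOffsets 0 ds).zip ds).filterMap
    (fun p => if PySem.Str.startswith p.2 "int main(" then some p.1 else none)

-- ===== PRECONDITION & SPEC =====
def Spec_get_rows_src_dataset (ds : List String) (out : List Int) : Prop := out = get_rows_src_dataset_alt ds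
instance (ds : List String) (out : List Int) : Decidable (Spec_get_rows_src_dataset ds out) := by unfold Spec_get_rows_src_dataset; infer_instance

-- ===== CLAIM (what is proved, stated in full; the proofs are below) =====
def Claim_equal_get_rows_src_dataset : Prop := ∀ (ds : List String), Dom_get_rows_src_dataset ds → Spec_get_rows_src_dataset ds (get_rows_src_dataset ds)

-- ===== LEMMAS AND PROOFS =====

lemma pv_loop_eq (ds : List String) (f : Int) (acc : List Int) :
    (ds.foldl pvStepA (f, acc)).2
    = acc ++ ((pvOffsets f ds).zip ds).filterMap
        (fun p => if PySem.Str.startswith p.2 "int main(" then some p.1 else none) := by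
  induction ds generalizing f acc with
  | nil => simp [pvOffsets]
  | cons l ls ih =>
    simp only [List.foldl_cons, pvOffsets, List.zip_cons_cons, List.filterMap_cons]
    rw [show pvStepA (f, acc) l = (f + (PySem.Str.len l : Int),
      if PySem.Chars.startswith l.toList ['i','n','t',' ','m','a','i','n','('] then acc ++ [f] else acc)
      from by simp [pvStepA, PySem.Str.startswith]]
    simp only [PySem.Str.startswith]
    by_cases h : PySem.Chars.startswith l.toList ['i','n','t',' ','m','a','i','n','(']
    · simp [h, ih, List.append_assoc]
    · simp [h, ih]

-- ===== VERDICT (by name: the statement is the Claim_ definition above) =====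
theorem get_rows_src_dataset_spec : Claim_equal_get_rows_src_dataset := by
  intro ds _
  unfold Spec_get_rows_src_dataset get_rows_src_dataset get_rows_src_dataset_alt
  simpa using pv_loop_eq ds 0 []
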